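-- pv_equiv track=rewrite | github.com/tkddls23/BaekJoon | haeram/python/pg_169199.py | solution
-- ===== SOURCE A (Python) =====
-- from collections import deque
--
-- def solution(board):
--     row = len(board)
--     col = len(board[0])
--
--     visited = [[0]*col for _ in range(row)]
--     dx = [1, 0, -1, 0]
--     dy = [0, -1, 0, 1]
--
--     # get start point and goal
--     sy, sx = 0, 0
--     for i in range(row):
--         for j in range(col):
--             if board[i][j] == 'R':
--                 sy, sx = i, j
--
--     dq = deque()
--     dq.append((sy, sx))
--     visited[sy][sx] = 1
--
--     # bfs
--     while dq:
--         ny, nx = dq.popleft()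
--
--         if board[ny][nx] == 'G':
--             return visited[ny][nx] - 1
--
--         for i in range(4):
--             cy = ny
--             cx = nx
--
--             while 1:
--                 cy += dy[i]
--                 cx += dx[i]
--
--                 # 맵 밖으로 나간 경우
--                 if (cy>=row or cx>=col or cy<0 or cx<0):
--                     cy -= dy[i]
--                     cx -= dx[i]
--                     break
--
--                 # 장애물을 만난 경우
--                 if (board[cy][cx] == 'D'):
--                     cy -= dy[i]
--                     cx -= dx[i]
--                     break
--
--             if not visited[cy][cx]:
--                 visited[cy][cx] = visited[ny][nx] + 1
--                 dq.append((cy, cx))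
--
--     return -1
-- ===== SOURCE B (Python) =====
-- from collections import deque
--
-- def solution(board):
--     row = len(board)
--     col = len(board[0])
--     # Precompute the slide destination for every cell and direction by four
--     # linear sweeps, so each BFS transition is an O(1) table lookup.
--     left = [[0] * col for _ in range(row)]
--     right = [[0] * col for _ in range(row)]
--     up = [[0] * col for _ in range(row)]
--     down = [[0] * col for _ in range(row)]
--     for y in range(row):
--         s = 0
--         for x in range(col):
--             left[y][x] = s
--             if board[y][x] == 'D':
--                 s = x + 1
--         s = col - 1
--         for x in range(col - 1, -1, -1):
--             right[y][x] = s
--             if board[y][x] == 'D':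
--                 s = x - 1
--     for x in range(col):
--         s = 0
--         for y in range(row):
--             up[y][x] = s
--             if board[y][x] == 'D':
--                 s = y + 1
--         s = row - 1
--         for y in range(row - 1, -1, -1):
--             down[y][x] = s
--             if board[y][x] == 'D':
--                 s = y - 1
--     sy = sx = 0
--     for y in range(row):
--         for x in range(col):
--             if board[y][x] == 'R':
--                 sy, sx = y, x
--     visited = [[0] * col for _ in range(row)]
--     dq = deque([(sy, sx)])
--     visited[sy][sx] = 1
--     while dq:
--         y, x = dq.popleft()
--         if board[y][x] == 'G':
--             return visited[y][x] - 1
--         for cy, cx in ((y, right[y][x]), (up[y][x], x), (y, left[y][x]), (down[y][x], x)):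
--             if not visited[cy][cx]:
--                 visited[cy][cx] = visited[y][x] + 1
--                 dq.append((cy, cx))
--     return -1
-- ===== Notes on version B (the rewrite author's own statement) =====
-- stated objective: alternative
-- what changed: Replaces the per-transition while-loop slide walk with four slide-destination tables precomputed by linear row/column sweeps (O(1) BFS transitions; worst-case O(R*C) overall, but the upfront sweeps cost more than A's walk when the BFS exits early).
import Mathlib
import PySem

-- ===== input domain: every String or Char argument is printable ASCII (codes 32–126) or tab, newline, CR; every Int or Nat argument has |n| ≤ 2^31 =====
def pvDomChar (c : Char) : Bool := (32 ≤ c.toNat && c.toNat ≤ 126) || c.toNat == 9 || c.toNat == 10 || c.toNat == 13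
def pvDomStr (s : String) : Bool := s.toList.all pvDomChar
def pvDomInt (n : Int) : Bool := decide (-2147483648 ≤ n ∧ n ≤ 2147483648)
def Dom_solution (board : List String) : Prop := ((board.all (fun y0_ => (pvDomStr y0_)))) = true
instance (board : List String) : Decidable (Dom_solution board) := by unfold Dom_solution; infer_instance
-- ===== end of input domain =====

-- B replaces A's per-transition while-loop slide walk by four slide-destination
-- tables precomputed with linear row/column sweeps, so each BFS transition is a
-- table lookup; same BFS order and results.

-- ===== PORT A =====
-- common helpers (used by both ports): cell access board[y][x], functional 2-D
-- array update, and the R-search double loop (identical in Source A and Source B)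
def gAt (board : List String) (y x : Int) : Char :=
  (PySem.Str.pyGet? ((PySem.List.pyGet? board y).getD "") x).getD ' '

def upd2 (f : Int → Int → Int) (y x v : Int) : Int → Int → Int :=
  fun a b => if a = y ∧ b = x then v else f a b

def findR (board : List String) (row col : Int) : Int × Int :=
  (PySem.List.pyRange 0 row 1).foldl (fun st i =>
    (PySem.List.pyRange 0 col 1).foldl (fun st2 j =>
      if gAt board i j = 'R' then (i, j) else st2) st) (0, 0)

-- A's inner `while 1` slide: step by (dy,dx), undo the step at a wall or a 'D'.
-- Fuel-based; the caller passes fuel ≥ row+col+2, more than the walk can take.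
def walkA (board : List String) (row col dy dx : Int) : Nat → Int → Int → Int × Int
  | 0, cy, cx => (cy, cx)
  | f+1, cy, cx =>
    let cy1 := cy + dy
    let cx1 := cx + dx
    if cy1 ≥ row ∨ cx1 ≥ col ∨ cy1 < 0 ∨ cx1 < 0 then (cy1 - dy, cx1 - dx)
    else if gAt board cy1 cx1 = 'D' then (cy1 - dy, cx1 - dx)
    else walkA board row col dy dx f cy1 cx1

-- A's BFS loop: pop, return at 'G', slide in the 4 directions (dx,dy tables),
-- enqueue unvisited destinations.  Fuel ≥ row*col+2 > the number of pops.
def bfsA (board : List String) (row col : Int) (fw : Nat) :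
    Nat → List (Int × Int) → (Int → Int → Int) → Int
  | 0, _, _ => -1
  | _+1, [], _ => -1
  | f+1, (ny, nx) :: rest, visited =>
    if gAt board ny nx = 'G' then visited ny nx - 1
    else
      let st := (PySem.List.pyRange 0 4 1).foldl
        (fun (st : List (Int × Int) × (Int → Int → Int)) i =>
          let dyi := (PySem.List.pyGet? [0, -1, 0, 1] i).getD 0
          let dxi := (PySem.List.pyGet? [1, 0, -1, 0] i).getD 0
          let c := walkA board row col dyi dxi fw ny nx
          if st.2 c.1 c.2 = 0 then (st.1 ++ [c], upd2 st.2 c.1 c.2 (st.2 ny nx + 1))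
          else st) (rest, visited)
      bfsA board row col fw f st.1 st.2

def solution (board : List String) : Int :=
  let row : Int := board.length
  let col : Int := PySem.Str.len ((PySem.List.pyGet? board 0).getD "")
  let s := findR board row col
  bfsA board row col ((row + col).toNat + 2) ((row * col).toNat + 2)
    [s] (upd2 (fun _ _ => 0) s.1 s.2 1)

-- ===== PORT B =====
-- Source B's sweep loop: run over the indices with the running stop `s`, record `s`
-- in the table at each index, and reset `s` to x+d after a 'D' (d = +1 ascending,
-- -1 descending).
def rowD (board : List String) (y x : Int) : Bool := gAt board y x == 'D'
def colD (board : List String) (x y : Int) : Bool := gAt board y x == 'D'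

def sweepB (isD : Int → Bool) (d : Int) (idxs : List Int) (s0 : Int) (t0 : Int → Int) :
    Int → Int :=
  (idxs.foldl (fun (st : Int × (Int → Int)) z =>
    ((if isD z then z + d else st.1), fun x' => if x' = z then st.1 else st.2 x')) (s0, t0)).2

-- the four slide-destination tables of Source B
def leftT (board : List String) (col y : Int) : Int → Int :=
  sweepB (rowD board y) 1 (PySem.List.pyRange 0 col 1) 0 (fun _ => 0)
def rightT (board : List String) (col y : Int) : Int → Int :=
  sweepB (rowD board y) (-1) (PySem.List.pyRange (col-1) (-1) (-1)) (col-1) (fun _ => 0)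
def upT (board : List String) (row x : Int) : Int → Int :=
  sweepB (colD board x) 1 (PySem.List.pyRange 0 row 1) 0 (fun _ => 0)
def downT (board : List String) (row x : Int) : Int → Int :=
  sweepB (colD board x) (-1) (PySem.List.pyRange (row-1) (-1) (-1)) (row-1) (fun _ => 0)

-- Source B's BFS loop: identical queue discipline, but the four successors are
-- table lookups.
def bfsB (board : List String) (row col : Int) :
    Nat → List (Int × Int) → (Int → Int → Int) → Int
  | 0, _, _ => -1
  | _+1, [], _ => -1
  | f+1, (y, x) :: rest, visited =>
    if gAt board y x = 'G' then visited y x - 1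
    else
      let cands : List (Int × Int) :=
        [(y, rightT board col y x), (upT board row x y, x),
         (y, leftT board col y x), (downT board row x y, x)]
      let st := cands.foldl
        (fun (st : List (Int × Int) × (Int → Int → Int)) c =>
          if st.2 c.1 c.2 = 0 then (st.1 ++ [c], upd2 st.2 c.1 c.2 (st.2 y x + 1))
          else st) (rest, visited)
      bfsB board row col f st.1 st.2

def solution_alt (board : List String) : Int :=
  let row : Int := board.length
  let col : Int := PySem.Str.len ((PySem.List.pyGet? board 0).getD "")
  let s := findR board row col
  bfsB board row col ((row * col).toNat + 2) [s] (upd2 (fun _ _ => 0) s.1 s.2 1)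

-- ===== PRECONDITION & SPEC =====
-- Pre_ = exactly where the Python A returns: a nonempty board with a nonempty
-- first row, and no row shorter than the first (A's R-search scans every row up
-- to len(board[0]) and raises IndexError on a shorter row).
def Pre_solution (board : List String) : Prop :=
  board ≠ [] ∧ 0 < PySem.Str.len (board.headD "") ∧
    ∀ s ∈ board, PySem.Str.len (board.headD "") ≤ PySem.Str.len s
instance (board : List String) : Decidable (Pre_solution board) := by
  unfold Pre_solution; infer_instance

def pvWitness_solution : List String := ["RG"]

def Spec_solution (board : List String) (out : Int) : Prop := out = solution_alt board
instance (board : List String) (out : Int) : Decidable (Spec_solution board out) := by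
  unfold Spec_solution; infer_instance

-- ===== CLAIM (what is proved, stated in full; the proofs are below) =====
def Claim_equal_solution : Prop :=
  ∀ (board : List String), Dom_solution board → Pre_solution board →
    Spec_solution board (solution board)

-- ===== LEMMAS AND PROOFS =====

-- destination of a slide, as a recursion on the position alone:
-- forward (x increasing, stop before n or a 'D')
def specF (isD : Int → Bool) (n : Int) (x : Int) : Int :=
  if h : x + 1 < n then (if isD (x+1) then x else specF isD n (x+1)) else x
  termination_by (n - x).toNat
  decreasing_by omega

-- backward (x decreasing, stop before -1 or a 'D')
def specG (isD : Int → Bool) (x : Int) : Int :=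
  if h : 0 ≤ x - 1 then (if isD (x-1) then x else specG isD (x-1)) else x
  termination_by (x + 1).toNat
  decreasing_by omega

theorem specF_bounds_aux (isD : Int → Bool) (n : Int) :
    ∀ (k : Nat) (x : Int), (n - x).toNat ≤ k → x < n →
      x ≤ specF isD n x ∧ specF isD n x < n := by
  intro k
  induction k with
  | zero => intro x hk hx; omega
  | succ k ih =>
    intro x hk hx
    rw [specF]
    split
    · split
      · omega
      · have := ih (x+1) (by omega) (by omega); omega
    · omega

theorem specF_bounds (isD : Int → Bool) (n x : Int) (hx : x < n) :
    x ≤ specF isD n x ∧ specF isD n x < n :=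
  specF_bounds_aux isD n (n - x).toNat x le_rfl hx

theorem specG_bounds_aux (isD : Int → Bool) :
    ∀ (k : Nat) (x : Int), (x + 1).toNat ≤ k → 0 ≤ x →
      0 ≤ specG isD x ∧ specG isD x ≤ x := by
  intro k
  induction k with
  | zero => intro x hk hx; omega
  | succ k ih =>
    intro x hk hx
    rw [specG]
    split
    · split
      · omega
      · have := ih (x-1) (by omega) (by omega); omega
    · omega

theorem specG_bounds (isD : Int → Bool) (x : Int) (hx : 0 ≤ x) :
    0 ≤ specG isD x ∧ specG isD x ≤ x :=
  specG_bounds_aux isD (x+1).toNat x le_rfl hx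

-- A's walk = the spec recursion, in each of the four directions
theorem walk_right (board : List String) (row col : Int) :
    ∀ (f : Nat) (y x : Int), 0 ≤ y → y < row → 0 ≤ x → x < col → col ≤ x + f →
      walkA board row col 0 1 f y x = (y, specF (rowD board y) col x) := by
  intro f
  induction f with
  | zero => intro y x h1 h2 h3 h4 h5; omega
  | succ f ih =>
    intro y x h1 h2 h3 h4 h5
    rw [walkA]
    simp only [add_zero, add_sub_cancel_right, sub_zero]
    by_cases hb : y ≥ row ∨ x + 1 ≥ col ∨ y < 0 ∨ x + 1 < 0
    · rw [if_pos hb, specF, dif_neg (by omega)]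
    · rw [if_neg hb, specF, dif_pos (by omega)]
      by_cases hD : gAt board y (x + 1) = 'D'
      · rw [if_pos hD, if_pos (by simp [rowD, hD])]
      · rw [if_neg hD, if_neg (by simp [rowD, hD]),
          ih y (x+1) h1 h2 (by omega) (by omega) (by omega)]

theorem walk_left (board : List String) (row col : Int) :
    ∀ (f : Nat) (y x : Int), 0 ≤ y → y < row → 0 ≤ x → x < col → x < f →
      walkA board row col 0 (-1) f y x = (y, specG (rowD board y) x) := by
  intro f
  induction f with
  | zero => intro y x h1 h2 h3 h4 h5; omega
  | succ f ih =>
    intro y x h1 h2 h3 h4 h5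
    rw [walkA]
    simp only [add_zero, sub_zero]
    have hxx : x + -1 - -1 = x := by ring
    have hx1 : x + -1 = x - 1 := by ring
    rw [hxx, hx1]
    by_cases hb : y ≥ row ∨ x - 1 ≥ col ∨ y < 0 ∨ x - 1 < 0
    · rw [if_pos hb, specG, dif_neg (by omega)]
    · rw [if_neg hb, specG, dif_pos (by omega)]
      by_cases hD : gAt board y (x - 1) = 'D'
      · rw [if_pos hD, if_pos (by simp [rowD, hD])]
      · rw [if_neg hD, if_neg (by simp [rowD, hD]),
          ih y (x-1) h1 h2 (by omega) (by omega) (by omega)]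

theorem walk_down (board : List String) (row col : Int) :
    ∀ (f : Nat) (y x : Int), 0 ≤ y → y < row → 0 ≤ x → x < col → row ≤ y + f →
      walkA board row col 1 0 f y x = (specF (colD board x) row y, x) := by
  intro f
  induction f with
  | zero => intro y x h1 h2 h3 h4 h5; omega
  | succ f ih =>
    intro y x h1 h2 h3 h4 h5
    rw [walkA]
    simp only [add_zero, add_sub_cancel_right, sub_zero]
    by_cases hb : y + 1 ≥ row ∨ x ≥ col ∨ y + 1 < 0 ∨ x < 0
    · rw [if_pos hb, specF, dif_neg (by omega)]
    · rw [if_neg hb, specF, dif_pos (by omega)]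
      by_cases hD : gAt board (y + 1) x = 'D'
      · rw [if_pos hD, if_pos (by simp [colD, hD])]
      · rw [if_neg hD, if_neg (by simp [colD, hD]),
          ih (y+1) x (by omega) (by omega) h3 h4 (by omega)]

theorem walk_up (board : List String) (row col : Int) :
    ∀ (f : Nat) (y x : Int), 0 ≤ y → y < row → 0 ≤ x → x < col → y < f →
      walkA board row col (-1) 0 f y x = (specG (colD board x) y, x) := by
  intro f
  induction f with
  | zero => intro y x h1 h2 h3 h4 h5; omega
  | succ f ih =>
    intro y x h1 h2 h3 h4 h5
    rw [walkA]
    simp only [add_zero, sub_zero]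
    have hyy : y + -1 - -1 = y := by ring
    have hy1 : y + -1 = y - 1 := by ring
    rw [hyy, hy1]
    by_cases hb : y - 1 ≥ row ∨ x ≥ col ∨ y - 1 < 0 ∨ x < 0
    · rw [if_pos hb, specG, dif_neg (by omega)]
    · rw [if_neg hb, specG, dif_pos (by omega)]
      by_cases hD : gAt board (y - 1) x = 'D'
      · rw [if_pos hD, if_pos (by simp [colD, hD])]
      · rw [if_neg hD, if_neg (by simp [colD, hD]),
          ih (y-1) x (by omega) (by omega) h3 h4 (by omega)]

-- the sweeps compute the same spec recursions
theorem sweepB_nil (isD : Int → Bool) (d s0 : Int) (t0 : Int → Int) :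
    sweepB isD d [] s0 t0 = t0 := rfl

theorem sweepB_cons (isD : Int → Bool) (d : Int) (z : Int) (l : List Int) (s0 : Int)
    (t0 : Int → Int) :
    sweepB isD d (z :: l) s0 t0
      = sweepB isD d l (if isD z then z + d else s0) (fun x' => if x' = z then s0 else t0 x') :=
  rfl

theorem sweep_asc (isD : Int → Bool) (n : Int) :
    ∀ (k : Nat) (a s0 : Int) (t0 : Int → Int) (x : Int), (n - a).toNat ≤ k → 0 ≤ a →
      s0 = specG isD a →
      sweepB isD 1 (PySem.List.pyRange a n 1) s0 t0 x
        = if a ≤ x ∧ x < n then specG isD x else t0 x := by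
  intro k
  induction k with
  | zero =>
    intro a s0 t0 x hk ha hs0
    rw [PySem.List.pyRange_one_eq_nil (by omega), sweepB_nil, if_neg (by omega)]
  | succ k ih =>
    intro a s0 t0 x hk ha hs0
    by_cases han : a < n
    · rw [PySem.List.pyRange_one_cons han, sweepB_cons,
        ih (a+1) _ _ x (by omega) (by omega)
          (by rw [specG, dif_pos (by omega)]; simp only [add_sub_cancel_right, hs0])]
      by_cases hx : a ≤ x ∧ x < n
      · by_cases hxa : x = a
        · rw [if_neg (by omega), if_pos hx, hxa, if_pos rfl, hs0]
        · rw [if_pos ⟨by omega, hx.2⟩, if_pos hx]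
      · rw [if_neg (by omega), if_neg (by omega), if_neg hx]
    · rw [PySem.List.pyRange_one_eq_nil (by omega), sweepB_nil, if_neg (by omega)]

theorem sweep_desc (isD : Int → Bool) (n : Int) :
    ∀ (k : Nat) (a s0 : Int) (t0 : Int → Int) (x : Int), (a + 1).toNat ≤ k → a < n →
      s0 = specF isD n a →
      sweepB isD (-1) (PySem.List.pyRange a (-1) (-1)) s0 t0 x
        = if 0 ≤ x ∧ x ≤ a then specF isD n x else t0 x := by
  intro k
  induction k with
  | zero =>
    intro a s0 t0 x hk han hs0
    rw [PySem.List.pyRange_neg_one_eq_nil (by omega), sweepB_nil, if_neg (by omega)]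
  | succ k ih =>
    intro a s0 t0 x hk han hs0
    by_cases ha : 0 ≤ a
    · rw [PySem.List.pyRange_neg_one_cons (by omega), sweepB_cons,
        ih (a-1) _ _ x (by omega) (by omega)
          (by rw [specF, dif_pos (by omega : a - 1 + 1 < n)]
              have e : a - 1 + 1 = a := by ring
              rw [e]
              have e2 : a + -1 = a - 1 := by ring
              rw [e2, hs0])]
      by_cases hx : 0 ≤ x ∧ x ≤ a
      · by_cases hxa : x = a
        · rw [if_neg (by omega), if_pos hx, hxa, if_pos rfl, hs0]
        · rw [if_pos ⟨hx.1, by omega⟩, if_pos hx]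
      · rw [if_neg (by omega), if_neg (by omega), if_neg hx]
    · rw [PySem.List.pyRange_neg_one_eq_nil (by omega), sweepB_nil, if_neg (by omega)]

theorem leftT_spec (board : List String) (col y x : Int) (h0 : 0 ≤ x) (h1 : x < col) :
    leftT board col y x = specG (rowD board y) x := by
  rw [leftT, sweep_asc (rowD board y) col (col - 0).toNat 0 0 _ x le_rfl le_rfl
    (by rw [specG, dif_neg (by omega)]), if_pos ⟨h0, h1⟩]

theorem rightT_spec (board : List String) (col y x : Int) (h0 : 0 ≤ x) (h1 : x < col) :
    rightT board col y x = specF (rowD board y) col x := by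
  rw [rightT, sweep_desc (rowD board y) col (col - 1 + 1).toNat (col - 1) (col - 1) _ x
    le_rfl (by omega) (by rw [specF, dif_neg (by omega)]), if_pos ⟨h0, by omega⟩]

theorem upT_spec (board : List String) (row x y : Int) (h0 : 0 ≤ y) (h1 : y < row) :
    upT board row x y = specG (colD board x) y := by
  rw [upT, sweep_asc (colD board x) row (row - 0).toNat 0 0 _ y le_rfl le_rfl
    (by rw [specG, dif_neg (by omega)]), if_pos ⟨h0, h1⟩]

theorem downT_spec (board : List String) (row x y : Int) (h0 : 0 ≤ y) (h1 : y < row) :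
    downT board row x y = specF (colD board x) row y := by
  rw [downT, sweep_desc (colD board x) row (row - 1 + 1).toNat (row - 1) (row - 1) _ y
    le_rfl (by omega) (by rw [specF, dif_neg (by omega)]), if_pos ⟨h0, by omega⟩]

def inR (row col : Int) (c : Int × Int) : Prop :=
  0 ≤ c.1 ∧ c.1 < row ∧ 0 ≤ c.2 ∧ c.2 < col

def stepQ (y x : Int) (st : List (Int × Int) × (Int → Int → Int)) (c : Int × Int) :
    List (Int × Int) × (Int → Int → Int) :=
  if st.2 c.1 c.2 = 0 then (st.1 ++ [c], upd2 st.2 c.1 c.2 (st.2 y x + 1)) else st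

theorem foldA_eq (board : List String) (row col : Int) (fw : Nat) (ny nx : Int)
    (st0 : List (Int × Int) × (Int → Int → Int)) :
    (PySem.List.pyRange 0 4 1).foldl
      (fun (st : List (Int × Int) × (Int → Int → Int)) i =>
        let dyi := (PySem.List.pyGet? [0, -1, 0, 1] i).getD 0
        let dxi := (PySem.List.pyGet? [1, 0, -1, 0] i).getD 0
        let c := walkA board row col dyi dxi fw ny nx
        if st.2 c.1 c.2 = 0 then (st.1 ++ [c], upd2 st.2 c.1 c.2 (st.2 ny nx + 1))
        else st) st0
    = [walkA board row col 0 1 fw ny nx, walkA board row col (-1) 0 fw ny nx,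
       walkA board row col 0 (-1) fw ny nx, walkA board row col 1 0 fw ny nx].foldl
        (stepQ ny nx) st0 := rfl

theorem stepQ_inv (row col y x : Int) (cands : List (Int × Int))
    (st : List (Int × Int) × (Int → Int → Int))
    (h1 : ∀ c ∈ st.1, inR row col c) (h2 : ∀ c ∈ cands, inR row col c) :
    ∀ c ∈ (cands.foldl (stepQ y x) st).1, inR row col c := by
  refine List.foldlRecOn (motive := fun st => ∀ c ∈ st.1, inR row col c) cands (stepQ y x) h1 ?_
  intro b hb a ha
  rw [stepQ]
  split
  · intro c hc
    rcases List.mem_append.1 hc with h | h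
    · exact hb c h
    · rw [List.mem_singleton.1 h]; exact h2 a ha
  · exact hb

theorem bfs_eq (board : List String) (row col : Int) (fw : Nat)
    (hc : col ≤ (fw : Int)) (hr : row ≤ (fw : Int)) :
    ∀ (f : Nat) (dq : List (Int × Int)) (visited : Int → Int → Int),
      (∀ c ∈ dq, inR row col c) →
      bfsA board row col fw f dq visited = bfsB board row col f dq visited := by
  intro f
  induction f with
  | zero => intro dq v _; rfl
  | succ f ih =>
    intro dq v hdq
    match dq with
    | [] => rfl
    | (y, x) :: rest =>
      obtain ⟨hy0, hy1, hx0, hx1⟩ := hdq (y, x) (by simp)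
      rw [bfsA, bfsB]
      by_cases hG : gAt board y x = 'G'
      · rw [if_pos hG, if_pos hG]
      · rw [if_neg hG, if_neg hG]
        have e0 : walkA board row col 0 1 fw y x = (y, rightT board col y x) := by
          rw [walk_right board row col fw y x hy0 hy1 hx0 hx1 (by omega),
            rightT_spec board col y x hx0 hx1]
        have e1 : walkA board row col (-1) 0 fw y x = (upT board row x y, x) := by
          rw [walk_up board row col fw y x hy0 hy1 hx0 hx1 (by omega),
            upT_spec board row x y hy0 hy1]
        have e2 : walkA board row col 0 (-1) fw y x = (y, leftT board col y x) := by
          rw [walk_left board row col fw y x hy0 hy1 hx0 hx1 (by omega),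
            leftT_spec board col y x hx0 hx1]
        have e3 : walkA board row col 1 0 fw y x = (downT board row x y, x) := by
          rw [walk_down board row col fw y x hy0 hy1 hx0 hx1 (by omega),
            downT_spec board row x y hy0 hy1]
        rw [foldA_eq, e0, e1, e2, e3]
        have hcands : ∀ c ∈ [(y, rightT board col y x), (upT board row x y, x),
            (y, leftT board col y x), (downT board row x y, x)], inR row col c := by
          intro c hc
          have hb0 := specF_bounds (rowD board y) col x hx1
          have hb1 := specG_bounds (colD board x) y hy0
          have hb2 := specG_bounds (rowD board y) x hx0
          have hb3 := specF_bounds (colD board x) row y hy1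
          rw [rightT_spec board col y x hx0 hx1] at hc
          rw [upT_spec board row x y hy0 hy1] at hc
          rw [leftT_spec board col y x hx0 hx1] at hc
          rw [downT_spec board row x y hy0 hy1] at hc
          simp only [List.mem_cons, List.not_mem_nil, or_false] at hc
          rcases hc with h | h | h | h <;> subst h <;>
            exact ⟨by omega, by omega, by omega, by omega⟩
        have hrest : ∀ c ∈ rest, inR row col c := fun c h => hdq c (by simp [h])
        exact ih _ _ (stepQ_inv row col y x _ (rest, v) hrest hcands)

theorem findR_inR (board : List String) (row col : Int) (hr : 0 < row) (hc : 0 < col) :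
    inR row col (findR board row col) := by
  rw [findR]
  refine List.foldlRecOn _ _ ⟨le_rfl, hr, le_rfl, hc⟩ ?_
  intro st hst i hi
  refine List.foldlRecOn _ _ hst ?_
  intro st2 hst2 j hj
  split
  · rw [PySem.List.mem_pyRange_one] at hi hj
    exact ⟨hi.1, hi.2, hj.1, hj.2⟩
  · exact hst2

-- ===== VERDICT (by name: the statement is the Claim_ definition above) =====
theorem solution_spec : Claim_equal_solution := by
  intro board _ hpre
  obtain ⟨hne, hlen, _⟩ := hpre
  have hrow : (0:Int) < (board.length : Int) := by
    cases board with
    | nil => exact absurd rfl hne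
    | cons h t => exact_mod_cast Nat.succ_pos t.length
  have hcol : (0:Int) < PySem.Str.len ((PySem.List.pyGet? board 0).getD "") := by
    cases board with
    | nil => exact absurd rfl hne
    | cons h t =>
      have h0 : (PySem.List.pyGet? (h :: t) (0:Int)).getD "" = h := by
        simp [PySem.List.pyGet?, PySem.List.pyIdx?]
      rw [h0]
      simpa using hlen
  unfold Spec_solution solution solution_alt
  refine bfs_eq board _ _ _ (by omega) (by omega) _ _ _ ?_
  intro c hc
  rw [List.mem_singleton] at hc
  subst hc
  exact findR_inR board _ _ hrow hcol
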